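-- pv_equiv track=rewrite | github.com/PTIT-D22KH/python-codeptit | submit/pykt078/pykt078.py | solve
-- ===== SOURCE A (Python) =====
-- def solve(a, n, m):
--     max_val = max(a)
--     index = a.index(max_val)
--     a.insert(index, m)
--
--     negatives = [x for x in a if x < 0]
--     non_negatives = [x for x in a if x >= 0]
--
--     new_arr = negatives + non_negatives
--     return new_arr
-- ===== SOURCE B (Python) =====
-- def solve(a, n, m):
--     # one fused pass: no list.index / list.insert / filter passes.
--     # m is dropped into the right bucket just before the first maximum;
--     # every element goes straight into its bucket as we scan.
--     # (return-value equivalence only: unlike A, this does not mutate a.)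
--     max_val = max(a)
--     neg, nonneg = [], []
--     placed = False
--     for x in a:
--         if not placed and x == max_val:
--             (neg if m < 0 else nonneg).append(m)
--             placed = True
--         (neg if x < 0 else nonneg).append(x)
--     return neg + nonneg
-- ===== Notes on version B (the rewrite author's own statement) =====
-- stated objective: alternative
-- what changed: A's four passes (max, index, insert, two filter comprehensions) are fused into max plus ONE accumulator pass that drops m into the correct bucket just before the first maximum and routes every element into a negatives/non-negatives bucket as it scans; no index/insert/filter calls remain. B does not mutate a; equivalence is about the return value.
-- outside the precondition, e.g. on solve([], 0, 5): A raises ValueError, B raises ValueError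
import Mathlib
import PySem

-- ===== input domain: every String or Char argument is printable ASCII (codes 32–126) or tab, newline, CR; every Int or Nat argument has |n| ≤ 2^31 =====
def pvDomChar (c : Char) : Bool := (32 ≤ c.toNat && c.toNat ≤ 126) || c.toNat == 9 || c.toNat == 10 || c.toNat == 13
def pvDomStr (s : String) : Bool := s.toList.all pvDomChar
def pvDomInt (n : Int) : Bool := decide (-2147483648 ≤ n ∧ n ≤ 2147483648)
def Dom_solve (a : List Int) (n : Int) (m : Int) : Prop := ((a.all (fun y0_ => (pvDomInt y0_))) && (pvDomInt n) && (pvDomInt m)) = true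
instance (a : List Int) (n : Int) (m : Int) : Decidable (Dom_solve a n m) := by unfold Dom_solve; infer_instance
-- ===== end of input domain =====

-- B fuses A's index/insert/two-filter passes into one accumulator scan that places m just
-- before the first maximum; equivalence is about the return value (A also mutates a in place, B does not).

-- ===== PORT A =====
def solve (a : List Int) (n : Int) (m : Int) : List Int :=
  match PySem.List.max? a (fun x => x) with
  | none => []  -- unreachable under Pre_solve (max([]) raises ValueError)
  | some max_val =>
    match PySem.List.index? a max_val with
    | none => []  -- unreachable: max_val ∈ a
    | some index =>
      let a' := PySem.List.insert a (index : Int) m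
      let negatives := a'.filter (fun x => decide (x < 0))
      let non_negatives := a'.filter (fun x => decide (0 ≤ x))
      negatives ++ non_negatives

-- ===== PORT B =====
-- one step of B's fused loop: (neg bucket, nonneg bucket, placed flag)
def solveAltStep (max_val m : Int) (s : List Int × List Int × Bool) (x : Int) :
    List Int × List Int × Bool :=
  let s :=
    if !s.2.2 && (x == max_val) then
      if m < 0 then (s.1 ++ [m], s.2.1, true) else (s.1, s.2.1 ++ [m], true)
    else s
  if x < 0 then (s.1 ++ [x], s.2.1, s.2.2) else (s.1, s.2.1 ++ [x], s.2.2)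

def solve_alt (a : List Int) (n : Int) (m : Int) : List Int :=
  match PySem.List.max? a (fun x => x) with
  | none => []  -- unreachable under Pre_solve
  | some max_val =>
    let st := a.foldl (solveAltStep max_val m) ([], [], false)
    st.1 ++ st.2.1

-- ===== PRECONDITION & SPEC =====
-- Pre_ excludes only the empty list, on which Python's max(a) raises ValueError (both A and B).
def Pre_solve (a : List Int) (n : Int) (m : Int) : Prop := a ≠ []
instance (a : List Int) (n : Int) (m : Int) : Decidable (Pre_solve a n m) := by unfold Pre_solve; infer_instance
def pvWitness_solve : List Int × Int × Int := ([1, -2, 3], 3, 5)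

def Spec_solve (a : List Int) (n : Int) (m : Int) (out : List Int) : Prop := out = solve_alt a n m
instance (a : List Int) (n : Int) (m : Int) (out : List Int) : Decidable (Spec_solve a n m out) := by unfold Spec_solve; infer_instance

-- ===== CLAIM =====
def Claim_equal_solve : Prop := ∀ (a : List Int) (n : Int) (m : Int), Dom_solve a n m → Pre_solve a n m → Spec_solve a n m (solve a n m)

-- ===== LEMMAS AND PROOFS =====

-- once placed, the loop just filters the rest into the two buckets
theorem foldl_step_placed (mx m : Int) (xs neg nonneg : List Int) :
    xs.foldl (solveAltStep mx m) (neg, nonneg, true) =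
      (neg ++ xs.filter (fun x => decide (x < 0)),
       nonneg ++ xs.filter (fun x => decide (0 ≤ x)), true) := by
  induction xs generalizing neg nonneg with
  | nil => simp
  | cons x t ih =>
    by_cases hx : x < 0
    · have h0 : ¬ (0 ≤ x) := by omega
      simp [solveAltStep, hx, h0, ih]
    · have h0 : (0:Int) ≤ x := by omega
      simp [solveAltStep, hx, h0, ih]

-- before placing, reaching the first occurrence of mx at position i produces exactly
-- the partition of the list with m inserted at position i
theorem foldl_step_main (mx m : Int) (xs : List Int) (i : Nat)
    (hi : PySem.List.index? xs mx = some i) (neg nonneg : List Int) :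
    xs.foldl (solveAltStep mx m) (neg, nonneg, false) =
      (neg ++ (xs.take i ++ m :: xs.drop i).filter (fun x => decide (x < 0)),
       nonneg ++ (xs.take i ++ m :: xs.drop i).filter (fun x => decide (0 ≤ x)), true) := by
  induction xs generalizing i neg nonneg with
  | nil => simp [PySem.List.index?] at hi
  | cons x t ih =>
    by_cases hx : x = mx
    · subst hx
      have : i = 0 := by
        have := PySem.List.index?_cons_self (x := x) (xs := t)
        rw [this] at hi; exact (Option.some_inj.mp hi).symm
      subst this
      simp only [List.take_zero, List.drop_zero, List.nil_append]
      by_cases hm : m < 0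
      · by_cases hxneg : x < 0
        · have h0 : ¬ (0 ≤ x) := by omega
          simp [solveAltStep, hm, hxneg, h0, foldl_step_placed]
        · have h0 : (0:Int) ≤ x := by omega
          have hm0 : ¬ (0 ≤ m) := by omega
          simp [solveAltStep, hm, hxneg, h0, hm0, foldl_step_placed]
      · have hm0 : (0:Int) ≤ m := by omega
        by_cases hxneg : x < 0
        · have h0 : ¬ (0 ≤ x) := by omega
          simp [solveAltStep, hm, hm0, hxneg, h0, foldl_step_placed]
        · have h0 : (0:Int) ≤ x := by omega
          simp [solveAltStep, hm, hm0, hxneg, h0, foldl_step_placed]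
    · have hstep : PySem.List.index? (x :: t) mx = (PySem.List.index? t mx).map (· + 1) :=
        PySem.List.index?_cons_of_ne t hx
      rw [hstep] at hi
      rcases ht : PySem.List.index? t mx with _ | j
      · rw [ht] at hi; simp at hi
      · rw [ht] at hi
        have hij : i = j + 1 := by simp at hi; omega
        subst hij
        by_cases hxneg : x < 0
        · have h0 : ¬ (0 ≤ x) := by omega
          simp [solveAltStep, hx, hxneg, h0, ih j ht, List.filter_cons, List.take_succ_cons,
            List.drop_succ_cons]
        · have h0 : (0:Int) ≤ x := by omega
          simp [solveAltStep, hx, hxneg, h0, ih j ht, List.filter_cons, List.take_succ_cons,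
            List.drop_succ_cons]

-- ===== VERDICT =====
theorem solve_spec : Claim_equal_solve := by
  intro a n m _ _
  unfold Spec_solve solve solve_alt
  rcases hmax : PySem.List.max? a (fun x => x) with _ | mx
  · simp only [hmax]
  · simp only [hmax]
    rcases hid : PySem.List.index? a mx with _ | i
    · have hmem := PySem.List.max?_mem hmax
      rw [PySem.List.index?_eq_idxOf?] at hid
      simp_all
    · obtain ⟨hk, -, -⟩ := PySem.List.getElem_of_index?_eq_some hid
      dsimp only
      rw [PySem.List.insert_natCast a i m (Nat.le_of_lt hk)]
      rw [foldl_step_main mx m a i hid [] []]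
      simp
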